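-- pv_equiv track=rewrite | github.com/OliverMatthews/rubiksCube | dev.py | passFailCount
-- ===== SOURCE A (Python) =====
-- def passFailCount(resultsList):
--     # Initialises the pass and fail counters.
--     passCounter = 0
--     failCounter = 0
--
--     # Initialises the fail counters by type of failure.
--     greenCrossFailCounter = 0
--     greenSideFailCounter = 0
--     alignedCentersFailCounter = 0
--     alignedCornersFailCounter = 0
--     firstTwoRowsFailCounter = 0
--     blueCrossFailCounter = 0
--     blueSideFailCounter = 0
--     topLayerCornersFailCounter = 0
--
--     # Cycles through the results, and increments either the pass or fail
--     # counter depending on whether the simulation passed or failed.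
--     for i in resultsList:
--         if i == "GC":
--             failCounter += 1
--             greenCrossFailCounter += 1
--         elif i == "GS":
--             failCounter += 1
--             greenSideFailCounter += 1
--         elif i == "ACE":
--             failCounter += 1
--             alignedCentersFailCounter += 1
--         elif i == "ACO":
--             failCounter += 1
--             alignedCornersFailCounter += 1
--         elif i == "FTR":
--             failCounter += 1
--             firstTwoRowsFailCounter += 1
--         elif i == "BC":
--             failCounter += 1
--             blueCrossFailCounter += 1
--         elif i == "BS":
--             failCounter += 1
--             blueSideFailCounter += 1
--         elif i == "TLC":
--             failCounter += 1
--             topLayerCornersFailCounter += 1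
--         else:
--             passCounter += 1
--
--     # Packs all the failure types into a single array.
--     failCounterArray = [failCounter, greenCrossFailCounter, greenSideFailCounter, alignedCentersFailCounter, alignedCornersFailCounter, firstTwoRowsFailCounter, blueCrossFailCounter, blueSideFailCounter, topLayerCornersFailCounter]
--
--     # Returns the pass counter and failure counter array.
--     return passCounter, failCounterArray
-- ===== SOURCE B (Python) =====
-- FAIL_KEYS = ["GC", "GS", "ACE", "ACO", "FTR", "BC", "BS", "TLC"]
--
-- def passFailCount(resultsList):
--     # Frequency-table formulation: count each failure category directly,
--     # then derive the totals instead of per-element branching.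
--     counts = [resultsList.count(k) for k in FAIL_KEYS]
--     failCounter = sum(counts)
--     passCounter = len(resultsList) - failCounter
--     return passCounter, [failCounter] + counts
-- ===== Notes on version B (the rewrite author's own statement) =====
-- stated objective: idiomatic
-- what changed: Replaces the per-element if/elif branching with counters kept in loop state by a frequency-table formulation: count each of the eight fixed failure keys with list.count, sum them for the fail total, and derive passes as len minus fails.
import Mathlib
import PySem

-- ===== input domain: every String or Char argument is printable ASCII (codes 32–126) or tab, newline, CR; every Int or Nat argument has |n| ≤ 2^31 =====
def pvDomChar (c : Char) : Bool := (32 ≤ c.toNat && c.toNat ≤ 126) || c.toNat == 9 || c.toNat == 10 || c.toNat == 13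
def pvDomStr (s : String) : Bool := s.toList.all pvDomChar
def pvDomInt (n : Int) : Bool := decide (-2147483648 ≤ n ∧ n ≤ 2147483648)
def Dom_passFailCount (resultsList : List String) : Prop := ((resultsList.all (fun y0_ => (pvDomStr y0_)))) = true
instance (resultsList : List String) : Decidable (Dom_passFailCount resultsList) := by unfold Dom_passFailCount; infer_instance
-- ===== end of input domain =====

-- B is an idiomatic frequency-table formulation: count each fixed failure key, sum for the fail
-- total, derive passes as length minus fails; A's per-element if/elif loop-state disappears.

-- ===== PORT A =====
-- loop state: (passCounter, failCounter, gc, gs, ace, aco, ftr, bc, bs, tlc)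
def pfcStep (s : Int × Int × Int × Int × Int × Int × Int × Int × Int × Int) (i : String) :
    Int × Int × Int × Int × Int × Int × Int × Int × Int × Int :=
  match s with
  | (p, f, gc, gs, ace, aco, ftr, bc, bs, tlc) =>
    if i == "GC" then (p, f + 1, gc + 1, gs, ace, aco, ftr, bc, bs, tlc)
    else if i == "GS" then (p, f + 1, gc, gs + 1, ace, aco, ftr, bc, bs, tlc)
    else if i == "ACE" then (p, f + 1, gc, gs, ace + 1, aco, ftr, bc, bs, tlc)
    else if i == "ACO" then (p, f + 1, gc, gs, ace, aco + 1, ftr, bc, bs, tlc)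
    else if i == "FTR" then (p, f + 1, gc, gs, ace, aco, ftr + 1, bc, bs, tlc)
    else if i == "BC" then (p, f + 1, gc, gs, ace, aco, ftr, bc + 1, bs, tlc)
    else if i == "BS" then (p, f + 1, gc, gs, ace, aco, ftr, bc, bs + 1, tlc)
    else if i == "TLC" then (p, f + 1, gc, gs, ace, aco, ftr, bc, bs, tlc + 1)
    else (p + 1, f, gc, gs, ace, aco, ftr, bc, bs, tlc)

def passFailCount (resultsList : List String) : Int × List Int :=
  match resultsList.foldl pfcStep (0, 0, 0, 0, 0, 0, 0, 0, 0, 0) with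
  | (p, f, gc, gs, ace, aco, ftr, bc, bs, tlc) =>
    (p, [f, gc, gs, ace, aco, ftr, bc, bs, tlc])

-- ===== PORT B =====
def pfcFailKeys : List String := ["GC", "GS", "ACE", "ACO", "FTR", "BC", "BS", "TLC"]

def passFailCount_alt (resultsList : List String) : Int × List Int :=
  let counts := pfcFailKeys.map (fun k => (PySem.List.count resultsList k : Int))
  let failCounter := counts.sum
  let passCounter := (resultsList.length : Int) - failCounter
  (passCounter, failCounter :: counts)

-- ===== PRECONDITION & SPEC =====
def Spec_passFailCount (resultsList : List String) (out : Int × List Int) : Prop := out = passFailCount_alt resultsList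
instance (resultsList : List String) (out : Int × List Int) : Decidable (Spec_passFailCount resultsList out) := by unfold Spec_passFailCount; infer_instance

-- ===== CLAIM (what is proved, stated in full; the proofs are below) =====
def Claim_equal_passFailCount : Prop := ∀ (resultsList : List String), Dom_passFailCount resultsList → Spec_passFailCount resultsList (passFailCount resultsList)

-- ===== LEMMAS AND PROOFS =====
-- Int-valued occurrence count of v in l.
def pfcC (v : String) (l : List String) : Int := (l.count v : Int)

-- Total number of elements matching one of the eight failure keys.
def pfcF (l : List String) : Int :=
  pfcC "GC" l + pfcC "GS" l + pfcC "ACE" l + pfcC "ACO" l +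
  pfcC "FTR" l + pfcC "BC" l + pfcC "BS" l + pfcC "TLC" l

theorem pfc_foldl_char (l : List String)
    (p f gc gs ace aco ftr bc bs tlc : Int) :
    l.foldl pfcStep (p, f, gc, gs, ace, aco, ftr, bc, bs, tlc) =
      (p + (l.length : Int) - pfcF l, f + pfcF l,
       gc + pfcC "GC" l, gs + pfcC "GS" l, ace + pfcC "ACE" l, aco + pfcC "ACO" l,
       ftr + pfcC "FTR" l, bc + pfcC "BC" l, bs + pfcC "BS" l, tlc + pfcC "TLC" l) := by
  induction l generalizing p f gc gs ace aco ftr bc bs tlc with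
  | nil => simp [pfcF, pfcC]
  | cons x t ih =>
    simp only [List.foldl_cons, pfcStep]
    by_cases h1 : x = "GC"
    · subst h1
      rw [if_pos (by decide), ih]
      simp [pfcF, pfcC, Prod.mk.injEq]; omega
    · rw [if_neg (by simpa using h1)]
      by_cases h2 : x = "GS"
      · subst h2
        rw [if_pos (by decide), ih]
        simp [pfcF, pfcC, Prod.mk.injEq]; omega
      · rw [if_neg (by simpa using h2)]
        by_cases h3 : x = "ACE"
        · subst h3
          rw [if_pos (by decide), ih]
          simp [pfcF, pfcC, Prod.mk.injEq]; omega
        · rw [if_neg (by simpa using h3)]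
          by_cases h4 : x = "ACO"
          · subst h4
            rw [if_pos (by decide), ih]
            simp [pfcF, pfcC, Prod.mk.injEq]; omega
          · rw [if_neg (by simpa using h4)]
            by_cases h5 : x = "FTR"
            · subst h5
              rw [if_pos (by decide), ih]
              simp [pfcF, pfcC, Prod.mk.injEq]; omega
            · rw [if_neg (by simpa using h5)]
              by_cases h6 : x = "BC"
              · subst h6
                rw [if_pos (by decide), ih]
                simp [pfcF, pfcC, Prod.mk.injEq]; omega
              · rw [if_neg (by simpa using h6)]
                by_cases h7 : x = "BS"
                · subst h7
                  rw [if_pos (by decide), ih]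
                  simp [pfcF, pfcC, Prod.mk.injEq]; omega
                · rw [if_neg (by simpa using h7)]
                  by_cases h8 : x = "TLC"
                  · subst h8
                    rw [if_pos (by decide), ih]
                    simp [pfcF, pfcC, Prod.mk.injEq]; omega
                  · rw [if_neg (by simpa using h8), ih]
                    simp [pfcF, pfcC, h1, h2, h3, h4, h5, h6, h7, h8]
                    ring

-- ===== VERDICT (by name: the statement is the Claim_ definition above) =====
theorem passFailCount_spec : Claim_equal_passFailCount := by
  intro l _
  show passFailCount l = passFailCount_alt l
  rw [passFailCount, pfc_foldl_char]
  simp [passFailCount_alt, pfcFailKeys, PySem.List.count_eq, pfcF, pfcC]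
  ring
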